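-- pv_equiv track=rewrite | github.com/Michal0ss/WDI | WDI_algo/Zestaw_1/z29.py | is_multiply_of_sequence
-- ===== SOURCE A (Python) =====
-- def is_multiply_of_sequence(n):
--     k=1
--     while True:
--         an = k*k + k + 1
--         if an>n:
--             break
--         if n%an ==0:
--             return True
--         k+=1
--     return False
-- ===== SOURCE B (Python) =====
-- def is_multiply_of_sequence(n):
--     if n < 3:
--         return False
--     terms = set()
--     k = 1
--     while k * k + k + 1 <= n:
--         terms.add(k * k + k + 1)
--         k += 1
--     i = 1
--     while i * i <= n:
--         if n % i == 0 and (i in terms or n // i in terms):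
--             return True
--         i += 1
--     return False
-- ===== Notes on version B (the rewrite author's own statement) =====
-- stated objective: alternative
-- what changed: B precomputes the set of sequence terms k²+k+1 ≤ n, then scans divisor pairs (i, n//i) for i up to √n and tests set membership, instead of A's single linear scan testing divisibility by each term in turn.
import Mathlib
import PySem

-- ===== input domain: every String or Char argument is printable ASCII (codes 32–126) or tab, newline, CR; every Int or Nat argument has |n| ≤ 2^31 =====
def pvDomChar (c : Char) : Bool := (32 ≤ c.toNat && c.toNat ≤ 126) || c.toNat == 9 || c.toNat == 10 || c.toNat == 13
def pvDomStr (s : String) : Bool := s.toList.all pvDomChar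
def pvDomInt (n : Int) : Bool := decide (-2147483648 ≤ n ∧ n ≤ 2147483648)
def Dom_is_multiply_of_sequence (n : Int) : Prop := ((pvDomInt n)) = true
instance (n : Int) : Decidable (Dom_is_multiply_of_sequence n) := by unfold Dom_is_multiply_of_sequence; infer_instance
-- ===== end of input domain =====

-- B collects the sequence terms k²+k+1 ≤ n into a set and scans divisor pairs instead of
-- A's linear divisibility scan over k; objective: alternative.

-- ===== PORT A =====
-- A's while loop over k: break when the term exceeds n, return True when it divides n.
def pvGoA (n k : Int) : Bool :=
  if h : k * k + k + 1 > n then false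
  else if PySem.Int.mod n (k * k + k + 1) = 0 then true
  else pvGoA n (k + 1)
termination_by (n + 1 - k).toNat
decreasing_by
  have h0 : 0 ≤ k * k := mul_self_nonneg k
  have h1 : k + 1 ≤ n := by linarith [not_lt.mp h]
  omega

def is_multiply_of_sequence (n : Int) : Bool := pvGoA n 1

-- ===== PORT B =====
-- B's first loop: add each sequence term to the set while it stays below n.
def pvTerms (n k : Int) (terms : PySem.Set Int) : PySem.Set Int :=
  if h : k * k + k + 1 ≤ n then
    pvTerms n (k + 1) (PySem.Set.add terms (k * k + k + 1))
  else terms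
termination_by (n + 1 - k).toNat
decreasing_by
  have h0 : 0 ≤ k * k := mul_self_nonneg k
  have h1 : k + 1 ≤ n := by linarith
  omega

-- B's second loop: divisor scan while i² ≤ n; membership tests in the term set.
def pvGoB (n i : Int) (terms : PySem.Set Int) : Bool :=
  if h : i * i ≤ n then
    if PySem.Int.mod n i = 0 ∧
        (PySem.Set.contains terms i ∨
          PySem.Set.contains terms (PySem.Int.floordiv n i)) then true
    else pvGoB n (i + 1) terms
  else false
termination_by (n + 1 - i).toNat
decreasing_by
  have h1 : 0 ≤ i * i - i := by nlinarith [sq_nonneg (i - 1), sq_nonneg i]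
  have h2 : i ≤ n := by linarith
  omega

def is_multiply_of_sequence_alt (n : Int) : Bool :=
  if n < 3 then false
  else pvGoB n 1 (pvTerms n 1 PySem.Set.empty)

-- ===== PRECONDITION & SPEC =====
def Spec_is_multiply_of_sequence (n : Int) (out : Bool) : Prop := out = is_multiply_of_sequence_alt n
instance (n : Int) (out : Bool) : Decidable (Spec_is_multiply_of_sequence n out) := by unfold Spec_is_multiply_of_sequence; infer_instance

-- ===== CLAIM (what is proved, stated in full; the proofs are below) =====
def Claim_equal_is_multiply_of_sequence : Prop := ∀ (n : Int), Dom_is_multiply_of_sequence n → Spec_is_multiply_of_sequence n (is_multiply_of_sequence n)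

-- ===== LEMMAS AND PROOFS =====

-- A's loop returns true iff some j ≥ k has j*j+j+1 ≤ n dividing n.
theorem pvGoA_iff (n k : Int) (hk : 1 ≤ k) :
    pvGoA n k = true ↔ ∃ j, k ≤ j ∧ j * j + j + 1 ≤ n ∧ (j * j + j + 1) ∣ n := by
  revert hk
  induction k using pvGoA.induct (n := n) with
  | case1 k h =>
    intro hk
    rw [pvGoA, dif_pos h]
    simp only [Bool.false_eq_true, false_iff, not_exists]
    intro j; rintro ⟨hj, h1, -⟩
    have : k * k ≤ j * j := mul_le_mul (by omega) (by omega) (by omega) (by omega)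
    omega
  | case2 k h hm =>
    intro hk
    rw [pvGoA, dif_neg h, if_pos hm]
    refine ⟨fun _ => ⟨k, le_refl k, by omega, ?_⟩, fun _ => rfl⟩
    exact (PySem.Int.mod_eq_zero_iff_dvd n _).mp hm
  | case3 k h hm ih =>
    intro hk
    rw [pvGoA, dif_neg h, if_neg hm]
    rw [ih (by omega)]
    constructor
    · rintro ⟨j, hj, h1, h2⟩; exact ⟨j, by omega, h1, h2⟩
    · rintro ⟨j, hj, h1, h2⟩
      refine ⟨j, ?_, h1, h2⟩
      rcases eq_or_lt_of_le hj with rfl | h'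
      · exact absurd ((PySem.Int.mod_eq_zero_iff_dvd n _).mpr h2) hm
      · omega

-- membership in the collected term set
theorem mem_pvTerms (n k : Int) (s : PySem.Set Int) (hk : 1 ≤ k) (x : Int) :
    x ∈ pvTerms n k s ↔ x ∈ s ∨ ∃ j, k ≤ j ∧ j * j + j + 1 = x ∧ x ≤ n := by
  revert hk
  induction k, s using pvTerms.induct (n := n) with
  | case1 k s h ih =>
    intro hk
    rw [pvTerms, dif_pos h, ih (by omega)]
    rw [PySem.Set.mem_add]
    constructor
    · rintro (⟨hs | rfl⟩ | ⟨j, hj, rfl, hle⟩)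
      · exact Or.inl hs
      · exact Or.inr ⟨k, le_refl k, rfl, h⟩
      · exact Or.inr ⟨j, by omega, rfl, hle⟩
    · rintro (hs | ⟨j, hj, rfl, hle⟩)
      · exact Or.inl (Or.inl hs)
      · rcases eq_or_lt_of_le hj with rfl | h'
        · exact Or.inl (Or.inr rfl)
        · exact Or.inr ⟨j, by omega, rfl, hle⟩
  | case2 k s h =>
    intro hk
    rw [pvTerms, dif_neg h]
    constructor
    · exact Or.inl
    · rintro (hs | ⟨j, hj, rfl, hle⟩)
      · exact hs
      · exfalso
        have : k * k ≤ j * j := mul_le_mul (by omega) (by omega) (by omega) (by omega)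
        omega

-- B's divisor loop returns true iff some divisor j ≥ i with j*j ≤ n hits the set.
theorem pvGoB_iff (n i : Int) (T : PySem.Set Int) (hi : 1 ≤ i) :
    pvGoB n i T = true ↔
      ∃ j, i ≤ j ∧ j * j ≤ n ∧ j ∣ n ∧ (j ∈ T ∨ PySem.Int.floordiv n j ∈ T) := by
  revert hi
  induction i using pvGoB.induct (n := n) (terms := T) with
  | case1 i h hc =>
    intro hi
    rw [pvGoB, dif_pos h, if_pos hc]
    obtain ⟨hm, hor⟩ := hc
    refine ⟨fun _ => ⟨i, le_refl i, h, (PySem.Int.mod_eq_zero_iff_dvd n i).mp hm, ?_⟩, fun _ => rfl⟩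
    rcases hor with hx | hx
    · exact Or.inl ((PySem.Set.contains_iff _ _).mp hx)
    · exact Or.inr ((PySem.Set.contains_iff _ _).mp hx)
  | case2 i h hc ih =>
    intro hi
    rw [pvGoB, dif_pos h, if_neg hc, ih (by omega)]
    constructor
    · rintro ⟨j, hj, h1, h2, h3⟩; exact ⟨j, by omega, h1, h2, h3⟩
    · rintro ⟨j, hj, h1, h2, h3⟩
      rcases eq_or_lt_of_le hj with heq | h'
      · subst heq
        exfalso
        apply hc
        refine ⟨(PySem.Int.mod_eq_zero_iff_dvd n i).mpr h2, ?_⟩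
        rcases h3 with hx | hx
        · exact Or.inl ((PySem.Set.contains_iff _ _).mpr hx)
        · exact Or.inr ((PySem.Set.contains_iff _ _).mpr hx)
      · exact ⟨j, by omega, h1, h2, h3⟩
  | case3 i h =>
    intro hi
    rw [pvGoB, dif_neg h]
    simp only [Bool.false_eq_true, false_iff, not_exists]
    intro j; rintro ⟨hj, h1, -⟩
    have : i * i ≤ j * j := mul_le_mul (by omega) (by omega) (by omega) (by omega)
    omega

-- the divisor-pair scan over the term set finds a term divisor iff the linear scan does
theorem main_iff (n : Int) (h3 : 3 ≤ n) :
    is_multiply_of_sequence n = is_multiply_of_sequence_alt n := by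
  unfold is_multiply_of_sequence is_multiply_of_sequence_alt
  rw [if_neg (by omega : ¬ n < 3)]
  rw [Bool.eq_iff_iff, pvGoA_iff n 1 (le_refl 1), pvGoB_iff n 1 _ (le_refl 1)]
  set T := pvTerms n 1 PySem.Set.empty with hTdef
  have hT : ∀ x, x ∈ T ↔ ∃ j, 1 ≤ j ∧ j * j + j + 1 = x ∧ x ≤ n := by
    intro x
    rw [hTdef, mem_pvTerms n 1 _ (le_refl 1) x]
    simp [PySem.Set.empty]
  constructor
  · rintro ⟨k, hk1, hle, hdvd⟩
    have hd3 : 3 ≤ k * k + k + 1 := by nlinarith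
    have hdT : k * k + k + 1 ∈ T := (hT _).mpr ⟨k, hk1, rfl, hle⟩
    by_cases hsq : (k * k + k + 1) * (k * k + k + 1) ≤ n
    · exact ⟨k * k + k + 1, by omega, hsq, hdvd, Or.inl hdT⟩
    · have hsq' : n < (k * k + k + 1) * (k * k + k + 1) := not_le.mp hsq
      obtain ⟨c, hc⟩ := hdvd
      have hcpos : 0 < c := by nlinarith
      have hcd : c < k * k + k + 1 := by nlinarith
      refine ⟨c, by omega, by nlinarith, ⟨k * k + k + 1, by linarith [hc, mul_comm (k*k+k+1) c]⟩, Or.inr ?_⟩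
      have hfd : PySem.Int.floordiv n c = k * k + k + 1 := by
        rw [PySem.Int.floordiv_eq_ediv_of_pos hcpos, hc]
        exact Int.mul_ediv_cancel _ (by omega)
      rw [hfd]; exact hdT
  · rintro ⟨i, hi1, hsq, hdvd, hT'⟩
    rcases hT' with hx | hx
    · obtain ⟨j, hj1, hji, hle⟩ := (hT i).mp hx
      exact ⟨j, hj1, by omega, by rw [hji]; exact hdvd⟩
    · obtain ⟨j, hj1, hji, hle⟩ := (hT _).mp hx
      have hipos : 0 < i := by omega
      have hfd : PySem.Int.floordiv n i = n / i := PySem.Int.floordiv_eq_ediv_of_pos hipos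
      rw [hfd] at hji hle
      have hmul : i * (n / i) = n := Int.mul_ediv_cancel' hdvd
      refine ⟨j, hj1, by omega, ?_⟩
      rw [hji]
      exact ⟨i, by rw [mul_comm]; omega⟩

-- ===== VERDICT (by name: the statement is the Claim_ definition above) =====
theorem is_multiply_of_sequence_spec : Claim_equal_is_multiply_of_sequence := by
  intro n _
  unfold Spec_is_multiply_of_sequence
  rcases lt_or_ge n 3 with h | h
  · unfold is_multiply_of_sequence is_multiply_of_sequence_alt
    rw [pvGoA]
    simp [h]
  · exact main_iff n h
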